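-- pv_equiv track=rewrite | github.com/teresaserradasduarte/teremon_behavior_and_ephys | histology/simplify_region_map.py | summarize_regions
-- ===== SOURCE A (Python) =====
-- from collections import defaultdict
-- from typing import Dict, List, Tuple, Optional
--
-- def summarize_regions(channels: List[Tuple[int, str, Optional[str]]]) -> Tuple[List[str], Dict[str, Tuple[int,int]], Dict[str,int]]:
--     region_order: List[str] = []
--     reg_indices: Dict[str, List[int]] = defaultdict(list)
--     for idx, _, region in channels:
--         region_name = region if region is not None else 'UNKNOWN'
--         if not region_order or region_order[-1] != region_name:
--             region_order.append(region_name)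
--         reg_indices[region_name].append(idx)
--     summary = {region: (min(idxs), max(idxs)) for region, idxs in reg_indices.items()}
--     counts = {region: len(idxs) for region, idxs in reg_indices.items()}
--     return region_order, summary, counts
-- ===== SOURCE B (Python) =====
-- from collections import Counter
--
--
-- def _span(channels, names, r):
--     idxs = [idx for (idx, _, _), n in zip(channels, names) if n == r]
--     return (min(idxs), max(idxs))
--
--
-- def summarize_regions(channels):
--     names = [r if r is not None else 'UNKNOWN' for _, _, r in channels]
--     region_order = [n for prev, n in zip([None] + names, names) if n != prev]
--     seen = list(dict.fromkeys(names))
--     cnt = Counter(names)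
--     summary = {r: _span(channels, names, r) for r in seen}
--     counts = {r: cnt[r] for r in seen}
--     return region_order, summary, counts
-- ===== Notes on version B (the rewrite author's own statement) =====
-- stated objective: alternative
-- what changed: B replaces A's single stateful fold (running region_order list plus defaultdict of index lists, reduced afterwards) with staged declarative passes: names once, adjacent-dedup via zip with the shifted list, first-seen keys via dict.fromkeys, a Counter for counts, and a per-region filtered index scan for the min/max spans.
import Mathlib
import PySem

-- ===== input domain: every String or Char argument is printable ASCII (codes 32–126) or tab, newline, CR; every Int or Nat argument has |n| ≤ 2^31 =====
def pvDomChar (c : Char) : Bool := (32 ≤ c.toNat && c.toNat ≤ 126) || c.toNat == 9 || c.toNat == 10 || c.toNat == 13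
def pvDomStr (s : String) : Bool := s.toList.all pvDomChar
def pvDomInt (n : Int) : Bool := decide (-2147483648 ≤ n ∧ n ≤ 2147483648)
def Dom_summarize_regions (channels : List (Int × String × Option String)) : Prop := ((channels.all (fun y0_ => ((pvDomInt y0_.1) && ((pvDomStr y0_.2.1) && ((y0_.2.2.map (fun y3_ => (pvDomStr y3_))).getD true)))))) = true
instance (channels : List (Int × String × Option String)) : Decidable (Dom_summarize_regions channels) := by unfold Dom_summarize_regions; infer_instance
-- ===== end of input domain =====

-- B replaces A's single stateful fold (region_order + dict of index lists reduced afterwards)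
-- with staged declarative passes: names, zip-with-shift adjacent dedup, dict.fromkeys, Counter,
-- per-region filtered scans. Alternative decomposition; not faster.


-- 'region if region is not None else "UNKNOWN"' (shared by both Pythons' loop/comprehension)
def pvName (r : Option String) : String := match r with | some s => s | none => "UNKNOWN"

-- ===== PORT A =====
-- loop body of A: append to region_order on change of region, append idx to reg_indices[region_name]
def pvStepA (st : List String × PySem.Dict String (List Int)) (ch : Int × String × Option String) :
    List String × PySem.Dict String (List Int) :=
  let region_name := pvName ch.2.2
  let region_order := if st.1 = [] ∨ PySem.List.pyGetD st.1 (-1) "" ≠ region_name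
    then st.1 ++ [region_name] else st.1
  (region_order, st.2.modify region_name [] (· ++ [ch.1]))

def summarize_regions (channels : List (Int × String × Option String)) :
    List String × (List (String × Int × Int)) × (List (String × Int)) :=
  let st := channels.foldl pvStepA ([], PySem.Dict.empty)
  -- min(idxs)/max(idxs): each stored list is nonempty, so the .getD 0 default is never used
  let summary := st.2.items.map (fun p =>
    (p.1, ((PySem.List.min? p.2 (fun x => x)).getD 0, (PySem.List.max? p.2 (fun x => x)).getD 0)))
  let counts := st.2.items.map (fun p => (p.1, PySem.List.len p.2))
  (st.1, summary, counts)

-- ===== PORT B =====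
-- _span: indices of the channels carrying region r (zip of channels with names), then (min, max);
-- the lists are nonempty for every r drawn from seen, so the .getD 0 default is never used
def pvSpan (channels : List (Int × String × Option String)) (names : List String) (r : String) :
    Int × Int :=
  let idxs := ((channels.zip names).filter (fun q => q.2 == r)).map (fun q => q.1.1)
  ((PySem.List.min? idxs (fun x => x)).getD 0, (PySem.List.max? idxs (fun x => x)).getD 0)

def summarize_regions_alt (channels : List (Int × String × Option String)) :
    List String × (List (String × Int × Int)) × (List (String × Int)) :=
  let names := channels.map (fun ch => pvName ch.2.2)
  -- [n for prev, n in zip([None] + names, names) if n != prev]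
  let region_order := ((none :: names.map some).zip names).filterMap
    (fun q => if some q.2 ≠ q.1 then some q.2 else none)
  let seen := PySem.List.dedup names              -- list(dict.fromkeys(names))
  let cnt := PySem.Dict.counter names             -- Counter(names)
  let summary := seen.map (fun r => (r, pvSpan channels names r))
  let counts := seen.map (fun r => (r, cnt.getD r 0))
  (region_order, summary, counts)

-- ===== PRECONDITION & SPEC =====
def Spec_summarize_regions (channels : List (Int × String × Option String)) (out : List String × (List (String × Int × Int)) × (List (String × Int))) : Prop := out = summarize_regions_alt channels
instance (channels : List (Int × String × Option String)) (out : List String × (List (String × Int × Int)) × (List (String × Int))) : Decidable (Spec_summarize_regions channels out) := by unfold Spec_summarize_regions; infer_instance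

-- ===== CLAIM (what is proved, stated in full; the proofs are below) =====
def Claim_equal_summarize_regions : Prop := ∀ (channels : List (Int × String × Option String)), Dom_summarize_regions channels → Spec_summarize_regions channels (summarize_regions channels)

-- ===== LEMMAS AND PROOFS =====

-- the indices A's dict stores under region r
def pvIdxs (channels : List (Int × String × Option String)) (r : String) : List Int :=
  (channels.filter (fun ch => pvName ch.2.2 == r)).map (fun ch => ch.1)

-- the region_order update, on the first component alone
def pvAdjStep (acc : List String) (n : String) : List String :=
  if acc = [] ∨ PySem.List.pyGetD acc (-1) "" ≠ n then acc ++ [n] else acc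

-- adjacent dedup of a name list, parameterised by the previous name (none at the start)
def pvG (p : Option String) (xs : List String) : List String :=
  match xs with
  | [] => []
  | x :: t => (if some x ≠ p then [x] else []) ++ pvG (some x) t

lemma pvFoldA_split (p : List (Int × String × Option String)) :
    ∀ (ro : List String) (d : PySem.Dict String (List Int)),
      p.foldl pvStepA (ro, d) =
        ((p.map (fun ch => pvName ch.2.2)).foldl pvAdjStep ro,
         p.foldl (fun d ch => d.modify (pvName ch.2.2) [] (· ++ [ch.1])) d) := by
  induction p with
  | nil => intro ro d; rfl
  | cons ch t ih =>
    intro ro d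
    simp only [List.foldl_cons, List.map_cons]
    rw [← ih]
    rfl

lemma pvFoldAdj (xs : List String) :
    ∀ acc, xs.foldl pvAdjStep acc = acc ++ pvG acc.getLast? xs := by
  induction xs with
  | nil => intro acc; simp [pvG]
  | cons x t ih =>
    intro acc
    rw [List.foldl_cons, ih]
    rcases eq_or_ne acc [] with rfl | hacc
    · simp [pvAdjStep, pvG]
    · have hlast : PySem.List.pyGetD acc (-1) "" = acc.getLast hacc :=
        PySem.List.pyGetD_neg_one acc "" hacc
      have hlast? : acc.getLast? = some (acc.getLast hacc) := List.getLast?_eq_some_getLast hacc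
      by_cases hne : acc.getLast hacc = x
      · have : pvAdjStep acc x = acc := by
          simp [pvAdjStep, hacc, hlast, hne]
        rw [this]
        simp [pvG, hlast?, hne]
      · have : pvAdjStep acc x = acc ++ [x] := by
          simp [pvAdjStep, hlast, hne]
        rw [this]
        have hne' : some x ≠ acc.getLast? := by simp [hlast?, Ne.symm hne]
        simp [pvG, hne', List.getLast?_append]
      

lemma pvZipPrev (xs : List String) :
    ∀ p : Option String,
      ((p :: xs.map some).zip xs).filterMap (fun q => if some q.2 ≠ q.1 then some q.2 else none)
        = pvG p xs := by
  induction xs with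
  | nil => intro p; rfl
  | cons x t ih =>
    intro p
    simp only [List.map_cons, List.zip_cons_cons, List.filterMap_cons, pvG]
    rw [← ih (some x)]
    by_cases h : some x ≠ p <;> simp [h]

lemma pvIdxs_append (p : List (Int × String × Option String)) (ch : Int × String × Option String)
    (r : String) :
    pvIdxs (p ++ [ch]) r = pvIdxs p r ++ (if pvName ch.2.2 = r then [ch.1] else []) := by
  simp only [pvIdxs, List.filter_append, List.map_append]
  by_cases h : pvName ch.2.2 = r <;> simp [h]

lemma pvFoldD_items (p : List (Int × String × Option String)) :
    (p.foldl (fun d ch => d.modify (pvName ch.2.2) [] (· ++ [ch.1])) PySem.Dict.empty).items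
      = (PySem.Set.ofList (p.map (fun ch => pvName ch.2.2))).map (fun r => (r, pvIdxs p r)) := by
  induction p using List.reverseRecOn with
  | nil => rfl
  | append_singleton p ch ih =>
    set d := p.foldl (fun d ch => d.modify (pvName ch.2.2) [] (· ++ [ch.1])) PySem.Dict.empty with hd
    set names := p.map (fun ch => pvName ch.2.2) with hnames
    set name := pvName ch.2.2 with hname
    have hkeys : d.keys = PySem.Set.ofList names := by
      simp [PySem.Dict.keys, ih, Function.comp_def]
    have hnd : d.keys.Nodup := by rw [hkeys]; exact PySem.Set.nodup_ofList names
    have hmapname : (p ++ [ch]).map (fun ch => pvName ch.2.2) = names ++ [name] := by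
      simp [hnames, ← hname]
    rw [List.foldl_append, List.foldl_cons, List.foldl_nil, hmapname, ← hd]
    rw [PySem.Set.ofList_append_singleton]
    by_cases hmem : name ∈ names
    · have hcont : d.contains name = true := by
        rw [PySem.Dict.contains_eq_decide_mem_keys, hkeys]
        simp [PySem.Set.mem_ofList, hmem]
      have hitem : (name, pvIdxs p name) ∈ d.items := by
        rw [ih]
        exact List.mem_map.mpr ⟨name, by simp [PySem.Set.mem_ofList, hmem], rfl⟩
      have hgetD : d.getD name [] = pvIdxs p name :=
        PySem.Dict.getD_of_mem_items d hitem hnd []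
      rw [PySem.Set.add_of_mem (by simp [PySem.Set.mem_ofList, hmem])]
      unfold PySem.Dict.modify
      rw [hgetD, PySem.Dict.items_insert_of_contains _ _ hcont, ih, List.map_map]
      refine List.map_congr_left ?_
      intro r hr
      by_cases hrn : r = name
      · subst hrn
        simp [pvIdxs_append, hname]
      · have hbeq : (r == name) = false := by simp [hrn]
        have hchr : ¬ pvName ch.2.2 = r := fun h => hrn ((hname.trans h).symm)
        simp [Function.comp, hbeq, pvIdxs_append, hchr]
    · have hcont : d.contains name = false := by
        rw [PySem.Dict.contains_eq_decide_mem_keys, hkeys]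
        simp [PySem.Set.mem_ofList, hmem]
      have hgetD : d.getD name [] = [] := PySem.Dict.getD_of_not_contains d [] hcont
      have hidxs_nil : pvIdxs p name = [] := by
        unfold pvIdxs
        rw [List.filter_eq_nil_iff.mpr, List.map_nil]
        intro x hx
        simp only [beq_iff_eq]
        intro hcontra
        exact hmem (hcontra ▸ List.mem_map.mpr ⟨x, hx, rfl⟩)
      rw [PySem.Set.add_of_not_mem (by simp [PySem.Set.mem_ofList, hmem])]
      unfold PySem.Dict.modify
      rw [hgetD, PySem.Dict.items_insert_of_not_contains _ _ hcont, ih, List.map_append]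
      congr 1
      · refine List.map_congr_left ?_
        intro r hr
        have hrn : r ≠ name := by
          rintro rfl
          exact hmem ((PySem.Set.mem_ofList _ _).mp hr)
        have hchr : ¬ pvName ch.2.2 = r := fun h => hrn ((hname.trans h).symm)
        simp [pvIdxs_append, hchr]
      · simp [pvIdxs_append, hidxs_nil, ← hname]

lemma pvZipNames (channels : List (Int × String × Option String)) (r : String) :
    ((channels.zip (channels.map (fun ch => pvName ch.2.2))).filter
        (fun q => q.2 == r)).map (fun q => q.1.1)
      = pvIdxs channels r := by
  induction channels with
  | nil => rfl
  | cons ch t ih =>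
    simp only [List.map_cons, List.zip_cons_cons, List.filter_cons, pvIdxs, List.filter]
    by_cases h : (pvName ch.2.2 == r) = true
    · simpa [h, pvIdxs] using ih
    · simp only [Bool.not_eq_true] at h
      simpa [h, pvIdxs] using ih

lemma pvCount_names (channels : List (Int × String × Option String)) (r : String) :
    PySem.List.len (pvIdxs channels r)
      = (List.count r (channels.map (fun ch => pvName ch.2.2)) : Int) := by
  simp only [pvIdxs, PySem.List.len, List.length_map, List.count_eq_countP, List.countP_map]
  rw [List.countP_eq_length_filter]
  rfl

-- ===== VERDICT (by name: the statement is the Claim_ definition above) =====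
theorem summarize_regions_spec : Claim_equal_summarize_regions := by
  intro channels _
  show summarize_regions channels = summarize_regions_alt channels
  simp only [summarize_regions, summarize_regions_alt,
    pvFoldA_split channels [] PySem.Dict.empty, pvFoldD_items,
    PySem.List.dedup_eq_ofList, List.map_map]
  refine congrArg₂ Prod.mk ?_ (congrArg₂ Prod.mk ?_ ?_)
  · rw [pvFoldAdj, ← List.map_map, pvZipPrev]
    rfl
  · refine List.map_congr_left ?_
    intro r hr
    simp only [Function.comp, pvSpan, pvZipNames]
  · refine List.map_congr_left ?_
    intro r hr
    simp only [Function.comp, pvCount_names, PySem.Dict.getD_counter]
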